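-- pv_equiv track=rewrite | github.com/josecatela/sgcodewars | day26/day26.py | diana_henninger_day26
-- ===== SOURCE A (Python) =====
-- def diana_henninger_day26(chars, n):
--     tree = ""
--     index = 0
--     for i in range(n): # each line
--         tree += (n-i-1) * ' ' #space
--         for j in range(i+1):  #each char
--             tree += chars[index%len(chars)] + ' '
--             index += 1
--         tree = tree[:-1] +'\n'
--     for k in range(n//3): # trunk
--         tree += (n-1) * ' ' + '|' + '\n'
--     return tree[:-1]
-- ===== SOURCE B (Python) =====
-- def diana_henninger_day26(chars, n):
--     # Materialise the whole cyclic character stream once, then peel one row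
--     # of growing width off its front per line; no per-character index arithmetic.
--     total = n * (n + 1) // 2
--     stream = chars * (total // len(chars) + 1) if n > 0 else ''
--     lines = []
--     for width in range(1, n + 1):
--         head, stream = stream[:width], stream[width:]
--         lines.append(' ' * (n - width) + ' '.join(head))
--     lines += [' ' * (n - 1) + '|'] * (n // 3)
--     return '\n'.join(lines)
-- ===== Notes on version B (the rewrite author's own statement) =====
-- stated objective: alternative
-- what changed: Instead of A's accumulator-threaded nested loop with a running modular index, B materialises the whole cyclic character stream once by string repetition, then peels one row of growing width off the stream's front per line and joins the lines; Pre_ excludes chars == '' with n >= 1, where A (and B) raise ZeroDivisionError.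
import Mathlib
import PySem

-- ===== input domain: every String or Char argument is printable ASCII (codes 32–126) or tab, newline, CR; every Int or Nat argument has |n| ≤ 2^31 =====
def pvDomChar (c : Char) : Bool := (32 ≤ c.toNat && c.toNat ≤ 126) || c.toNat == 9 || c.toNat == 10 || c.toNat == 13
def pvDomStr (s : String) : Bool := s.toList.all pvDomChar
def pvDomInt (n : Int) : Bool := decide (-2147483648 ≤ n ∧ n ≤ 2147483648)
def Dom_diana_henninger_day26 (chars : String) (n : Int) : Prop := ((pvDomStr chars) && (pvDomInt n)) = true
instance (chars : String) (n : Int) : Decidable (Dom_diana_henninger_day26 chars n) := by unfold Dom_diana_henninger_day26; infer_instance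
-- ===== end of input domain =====

-- B materialises the whole cyclic character stream once by repetition and peels one row
-- of growing width off its front per line, instead of A's accumulator-threaded nested
-- loop with a running modular index (objective: alternative).

-- ===== PORT A =====
-- A-side helpers: the two loop bodies of A, named so the proofs can speak about them
-- (each is a line-for-line transcription of the corresponding Python loop body).
-- tree += chars[index % len(chars)] + ' '; index += 1
-- (under Pre_ chars ≠ "", the mod index is in range, so pyGet? never misses and getD's default is unreachable)
def pvAinner (cs : List Char) (m : Int) (q : List Char × Int) (_j : Int) : List Char × Int :=
  (q.1 ++ [(PySem.List.pyGet? cs (PySem.Int.mod q.2 m)).getD ' '] ++ [' '], q.2 + 1)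
-- one iteration of 'for i in range(n)': tree += (n-i-1)*' '; for j in range(i+1): …; tree = tree[:-1] + '\n'
def pvAstep (cs : List Char) (m n : Int) (st : List Char × Int) (i : Int) : List Char × Int :=
  let tree := st.1 ++ PySem.List.pyRepeat [' '] (n - i - 1)
  let p := (PySem.List.pyRange 0 (i + 1) 1).foldl (pvAinner cs m) (tree, st.2)
  (PySem.List.slice p.1 none (some (-1)) ++ ['\n'], p.2)

def diana_henninger_day26 (chars : String) (n : Int) : String :=
  let cs := chars.toList
  let m : Int := (cs.length : Int)
  -- tree = ""; index = 0; for i in range(n): …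
  let st := (PySem.List.pyRange 0 n 1).foldl (pvAstep cs m n) ([], 0)
  -- for k in range(n//3): tree += (n-1)*' ' + '|' + '\n'
  let tree := (PySem.List.pyRange 0 (PySem.Int.floordiv n 3) 1).foldl
    (fun acc _k => acc ++ PySem.List.pyRepeat [' '] (n - 1) ++ ['|'] ++ ['\n']) st.1
  String.ofList (PySem.List.slice tree none (some (-1)))              -- return tree[:-1]

-- ===== PORT B =====
-- B's loop body: head, stream = stream[:width], stream[width:];
--                lines.append(' ' * (n - width) + ' '.join(head))
def pvBstep (nI : Int) (st : List (List Char) × List Char) (width : Int) :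
    List (List Char) × List Char :=
  let head := PySem.List.slice st.2 none (some width)
  let rest := PySem.List.slice st.2 (some width) none
  (st.1 ++ [PySem.List.pyRepeat [' '] (nI - width) ++
            PySem.Chars.join [' '] (head.map (fun c => [c]))], rest)

def diana_henninger_day26_alt (chars : String) (n : Int) : String :=
  let cs := chars.toList
  -- total = n * (n + 1) // 2
  let total := PySem.Int.floordiv (n * (n + 1)) 2
  -- stream = chars * (total // len(chars) + 1) if n > 0 else ''
  let stream := if n > 0 then
      PySem.List.pyRepeat cs (PySem.Int.floordiv total (cs.length : Int) + 1) else []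
  -- lines = []; for width in range(1, n + 1): …
  let st := (PySem.List.pyRange 1 (n + 1) 1).foldl (pvBstep n) ([], stream)
  -- lines += [' ' * (n - 1) + '|'] * (n // 3)
  let lines := st.1 ++
    PySem.List.pyRepeat [PySem.List.pyRepeat [' '] (n - 1) ++ ['|']] (PySem.Int.floordiv n 3)
  String.ofList (PySem.Chars.join ['\n'] lines)                       -- return '\n'.join(lines)

-- ===== PRECONDITION & SPEC =====
-- Pre_ excludes exactly the inputs where A raises: chars == "" with n ≥ 1 evaluates chars[index % 0] (ZeroDivisionError).
def Pre_diana_henninger_day26 (chars : String) (n : Int) : Prop := chars = "" → n ≤ 0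
instance (chars : String) (n : Int) : Decidable (Pre_diana_henninger_day26 chars n) := by unfold Pre_diana_henninger_day26; infer_instance
def pvWitness_diana_henninger_day26 : String × Int := ("ab", 4)
def Spec_diana_henninger_day26 (chars : String) (n : Int) (out : String) : Prop := out = diana_henninger_day26_alt chars n
instance (chars : String) (n : Int) (out : String) : Decidable (Spec_diana_henninger_day26 chars n out) := by unfold Spec_diana_henninger_day26; infer_instance

-- ===== CLAIM (what is proved, stated in full; the proofs are below) =====
def Claim_equal_diana_henninger_day26 : Prop := ∀ (chars : String) (n : Int), Dom_diana_henninger_day26 chars n → Pre_diana_henninger_day26 chars n → Spec_diana_henninger_day26 chars n (diana_henninger_day26 chars n)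

-- ===== LEMMAS AND PROOFS =====

-- the character picked at running index k
def pvCh (cs : List Char) (m k : Int) : Char := (PySem.List.pyGet? cs (PySem.Int.mod k m)).getD ' '

-- triangular numbers, recursively (Int form and Nat form)
def pvTri : Nat → Int
  | 0 => 0
  | k + 1 => pvTri k + (k + 1)
def pvTriN : Nat → Nat
  | 0 => 0
  | k + 1 => pvTriN k + (k + 1)

theorem pvTri_natCast (k : Nat) : pvTri k = ((pvTriN k : Nat) : Int) := by
  induction k with
  | zero => simp [pvTri, pvTriN]
  | succ k ih => simp only [pvTri, pvTriN, ih]; push_cast; ring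

theorem pvTriN_mono {a b : Nat} (h : a ≤ b) : pvTriN a ≤ pvTriN b := by
  induction h with
  | refl => exact le_refl _
  | step _ ih => rename_i b' _; exact le_trans ih (by simp [pvTriN])

theorem pvTri_eq (k : Nat) : PySem.Int.floordiv ((k : Int) * ((k : Int) + 1)) 2 = pvTri k := by
  have h2 : (k : Int) * ((k : Int) + 1) = 2 * pvTri k := by
    induction k with
    | zero => simp [pvTri]
    | succ k ih => simp only [pvTri]; push_cast; push_cast at ih; ring_nf; ring_nf at ih; omega
  rw [h2, PySem.Int.floordiv_eq_ediv_of_pos (by norm_num)]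
  exact Int.mul_ediv_cancel_left _ (by norm_num)

-- the chars+spaces a row's inner loop appends, and the ' '-joined form B builds
def pvFlat (f : Int → Char) (a : Int) (cnt : Nat) : List Char :=
  (List.range cnt).flatMap (fun (j : Nat) => [f (a + (j : Int)), ' '])
def pvJoin (f : Int → Char) (a : Int) (cnt : Nat) : List Char :=
  PySem.Chars.join [' '] ((List.range cnt).map (fun (j : Nat) => [f (a + (j : Int))]))

theorem pvJoin_append_singleton (s : List Char) : ∀ (l : List (List Char)) (x : List Char), l ≠ [] →
    PySem.Chars.join s (l ++ [x]) = PySem.Chars.join s l ++ s ++ x := by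
  intro l
  induction l with
  | nil => intro x h; exact absurd rfl h
  | cons a t ih =>
    intro x _
    cases t with
    | nil => simp [PySem.Chars.join_cons_cons, PySem.Chars.join_singleton]
    | cons b t' =>
      have h := ih x (by simp)
      simp only [List.cons_append] at h ⊢
      rw [PySem.Chars.join_cons_cons, PySem.Chars.join_cons_cons, h]
      simp [List.append_assoc]

theorem pvJoin_succ (f : Int → Char) (a : Int) (c : Nat) :
    pvJoin f a (c + 1 + 1)
      = pvJoin f a (c + 1) ++ [' '] ++ [f (a + ((c + 1 : Nat) : Int))] := by
  rw [pvJoin, List.range_succ, List.map_append]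
  simp only [List.map_cons, List.map_nil]
  rw [pvJoin_append_singleton [' '] _ _ (by simp), ← pvJoin]

theorem pvFlat_eq_pvJoin (f : Int → Char) (a : Int) : ∀ (cnt : Nat),
    pvFlat f a (cnt + 1) = pvJoin f a (cnt + 1) ++ [' '] := by
  intro cnt
  induction cnt with
  | zero => simp [pvFlat, pvJoin, PySem.Chars.join_singleton]
  | succ c ih =>
    rw [pvFlat, List.range_succ, List.flatMap_append, ← pvFlat, ih, pvJoin_succ]
    simp [List.append_assoc]

theorem pvFlat_succ_left (f : Int → Char) (a : Int) : ∀ (cnt : Nat),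
    pvFlat f a (cnt + 1) = [f a, ' '] ++ pvFlat f (a + 1) cnt := by
  intro cnt
  induction cnt with
  | zero => simp [pvFlat]
  | succ c ih =>
    have harg : a + (((c : Nat) : Int) + 1) = a + 1 + ((c : Nat) : Int) := by ring
    rw [pvFlat, List.range_succ, List.flatMap_append, ← pvFlat, ih]
    conv_rhs => rw [pvFlat, List.range_succ, List.flatMap_append, ← pvFlat]
    simp [harg]

-- inner loop: appends pvFlat and advances the index by the length of the range
theorem pvInner (cs : List Char) (m : Int) : ∀ (l : List Int) (t : List Char) (a : Int),
    l.foldl (pvAinner cs m) (t, a) = (t ++ pvFlat (pvCh cs m) a l.length, a + (l.length : Int)) := by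
  intro l
  induction l with
  | nil => intro t a; simp [pvFlat]
  | cons x l ih =>
    intro t a
    simp only [List.foldl_cons, pvAinner, List.length_cons]
    rw [ih, pvFlat_succ_left]
    simp only [Prod.mk.injEq]
    constructor
    · simp [pvCh, List.append_assoc]
    · push_cast; ring

-- what A has built after the first k rows
def pvRow (cs : List Char) (m n : Int) (k : Nat) : List Char :=
  PySem.List.pyRepeat [' '] (n - (k : Int) - 1) ++ pvJoin (pvCh cs m) (pvTri k) (k + 1)
def pvRowsCat (cs : List Char) (m n : Int) (k : Nat) : List Char :=
  ((List.range k).map (pvRow cs m n)).flatMap (fun x => x ++ ['\n'])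

theorem pvOuter (cs : List Char) (m nI : Int) : ∀ (k : Nat),
    (PySem.List.pyRange 0 (k : Int) 1).foldl (pvAstep cs m nI) ([], 0)
      = (pvRowsCat cs m nI k, pvTri k) := by
  intro k
  induction k with
  | zero =>
    rw [PySem.List.pyRange_one_eq_nil (by norm_num)]
    simp [pvRowsCat, pvTri]
  | succ k ih =>
    have hsplit : PySem.List.pyRange 0 ((k + 1 : Nat) : Int) 1
        = PySem.List.pyRange 0 (k : Int) 1 ++ [(k : Int)] := by
      push_cast
      exact PySem.List.pyRange_one_succ_right (Int.natCast_nonneg k)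
    rw [hsplit, List.foldl_append, ih]
    simp only [List.foldl_cons, List.foldl_nil, pvAstep]
    have hlen : (PySem.List.pyRange 0 ((k : Int) + 1) 1).length = k + 1 := by
      rw [PySem.List.length_pyRange_one]; omega
    rw [pvInner, hlen, pvFlat_eq_pvJoin, PySem.List.slice_to_neg_one]
    simp only [Prod.mk.injEq]
    constructor
    · rw [← List.append_assoc, List.dropLast_concat]
      simp [pvRowsCat, List.range_succ, pvRow, List.append_assoc]
    · simp only [pvTri]; push_cast; ring

-- A's trunk loop appends a constant block per iteration
theorem pvTrunkFold (X : List Char) : ∀ (l : List Int) (acc : List Char),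
    l.foldl (fun acc _k => acc ++ X ++ ['|'] ++ ['\n']) acc
      = acc ++ (List.replicate l.length (X ++ ['|'] ++ ['\n'])).flatten := by
  intro l
  induction l with
  | nil => intro acc; simp
  | cons x l ih =>
    intro acc
    simp only [List.foldl_cons, List.length_cons, List.replicate_succ, List.flatten_cons]
    rw [ih]
    simp [List.append_assoc]

-- the j-th element of the repeated stream is chars[j % len]
theorem pvStreamGet (cs : List Char) (hcs : cs ≠ []) : ∀ (r j : Nat), j < r * cs.length →
    ((List.replicate r cs).flatten)[j]? = cs[j % cs.length]? := by
  intro r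
  induction r with
  | zero => intro j hj; omega
  | succ r ih =>
    intro j hj
    rw [List.replicate_succ, List.flatten_cons]
    by_cases hlt : j < cs.length
    · rw [List.getElem?_append_left hlt, Nat.mod_eq_of_lt hlt]
    · push_neg at hlt
      have hlen : 0 < cs.length := List.length_pos_iff.mpr hcs
      have hmul : (r + 1) * cs.length = r * cs.length + cs.length := by ring
      rw [List.getElem?_append_right hlt, ih (j - cs.length) (by omega),
        Nat.mod_eq_sub_mod hlt]

-- B's row i, as the fold below produces it from the stream
def pvRowB (nI : Int) (s : List Char) (i : Nat) : List Char :=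
  PySem.List.pyRepeat [' '] (nI - (1 + (i : Int))) ++
    PySem.Chars.join [' '] (((s.drop (pvTriN i)).take (i + 1)).map (fun c => [c]))

-- B's loop peels widths 1..k off the stream, leaving the rows and the rest
theorem pvBfold (nI : Int) (s : List Char) : ∀ (k : Nat),
    (List.map (fun (j : Nat) => (1 : Int) + (j : Int)) (List.range k)).foldl (pvBstep nI) ([], s)
      = ((List.range k).map (pvRowB nI s), s.drop (pvTriN k)) := by
  intro k
  induction k with
  | zero => simp [pvTriN]
  | succ k ih =>
    rw [List.range_succ, List.map_append, List.foldl_append, ih]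
    simp only [List.map_cons, List.map_nil, List.foldl_cons, List.foldl_nil, pvBstep]
    have hw : (1 : Int) + (k : Int) = (((k + 1 : Nat) : Nat) : Int) := by push_cast; ring
    rw [hw, PySem.List.slice_to_natCast, PySem.List.slice_from_natCast]
    simp only [Prod.mk.injEq]
    refine ⟨?_, ?_⟩
    · rw [List.map_append]
      simp [pvRowB, hw]
    · rw [List.drop_drop]
      congr 1

-- B's row equals A's row when the stream covers it
theorem pvRowB_eq_pvRow (cs : List Char) (hcs : cs ≠ []) (nI : Int) (r i : Nat)
    (hcov : pvTriN (i + 1) ≤ r * cs.length) :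
    pvRowB nI ((List.replicate r cs).flatten) i = pvRow cs (cs.length : Int) nI i := by
  have hlen : 0 < cs.length := List.length_pos_iff.mpr hcs
  have hstreamlen : ((List.replicate r cs).flatten).length = r * cs.length := by
    simp [List.length_flatten]
  have hseg : (((List.replicate r cs).flatten).drop (pvTriN i)).take (i + 1)
      = (List.range (i + 1)).map (fun (j : Nat) => pvCh cs (cs.length : Int) (pvTri i + (j : Int))) := by
    have htri : pvTriN i + (i + 1) = pvTriN (i + 1) := by simp only [pvTriN]
    apply List.ext_getElem?
    intro j
    by_cases hj : j < i + 1
    · rw [List.getElem?_take_of_lt hj, List.getElem?_drop,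
        pvStreamGet cs hcs r (pvTriN i + j) (by omega)]
      rw [List.getElem?_map, List.getElem?_range hj]
      simp only [Option.map_some]
      have hch : pvCh cs (cs.length : Int) (pvTri i + (j : Int))
          = (cs[(pvTriN i + j) % cs.length]?).getD ' ' := by
        rw [pvCh, pvTri_natCast]
        have : ((pvTriN i : Nat) : Int) + (j : Int) = (((pvTriN i + j : Nat) : Nat) : Int) := by
          push_cast; ring
        rw [this, PySem.Int.mod_natCast, PySem.List.pyGet?_natCast]
      rw [hch, List.getElem?_eq_getElem (Nat.mod_lt _ hlen)]
      simp
    · push_neg at hj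
      rw [List.getElem?_eq_none, List.getElem?_eq_none]
      · simpa using hj
      · exact le_trans (List.length_take_le _ _) hj
  rw [pvRowB, hseg, pvRow, pvJoin, List.map_map]
  congr 1
  congr 1
  omega

-- flatMap of a replicated block is a flattened replicate
theorem pvRepFlat (c : List Char) : ∀ (t : Nat),
    (List.replicate t c).flatMap (fun x => x ++ ['\n'])
      = (List.replicate t (c ++ ['\n'])).flatten := by
  intro t
  induction t with
  | zero => simp
  | succ t ih => simp only [List.replicate_succ, List.flatMap_cons, List.flatten_cons, ih]

-- dropping the trailing newline of '\n'-terminated lines is '\n'.join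
theorem pvCatNL : ∀ (L : List (List Char)), L ≠ [] →
    (L.flatMap (fun x => x ++ ['\n'])).dropLast = PySem.Chars.join ['\n'] L := by
  intro L
  induction L with
  | nil => intro h; exact absurd rfl h
  | cons x t ih =>
    intro _
    cases t with
    | nil =>
      rw [List.flatMap_cons, List.flatMap_nil, List.append_nil, List.dropLast_concat,
        PySem.Chars.join_singleton]
    | cons y t' =>
      have hne : (y :: t').flatMap (fun x => x ++ ['\n']) ≠ [] := by
        simp [List.flatMap_cons]
      rw [List.flatMap_cons, PySem.Chars.join_cons_cons,
        List.dropLast_append_of_ne_nil hne, ih (by simp)]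
      try simp [List.append_assoc]

-- gluing: rows then trunk, '\n'-terminated and trailing newline stripped, is a join
theorem pvFinal (rows : List (List Char)) (c : List Char) (t : Nat) (hrows : rows ≠ []) :
    ((rows.flatMap (fun x => x ++ ['\n'])) ++ (List.replicate t (c ++ ['|'] ++ ['\n'])).flatten).dropLast
      = PySem.Chars.join ['\n'] (rows ++ List.replicate t (c ++ ['|'])) := by
  have key : rows.flatMap (fun x => x ++ ['\n'])
      ++ (List.replicate t (c ++ ['|'] ++ ['\n'])).flatten
      = (rows ++ List.replicate t (c ++ ['|'])).flatMap (fun x => x ++ ['\n']) := by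
    rw [List.flatMap_append, pvRepFlat]
    try simp [List.append_assoc]
  rw [key]
  exact pvCatNL _ (by intro h; exact hrows (List.append_eq_nil_iff.mp h).1)

-- ===== VERDICT (by name: the statement is the Claim_ definition above) =====
theorem diana_henninger_day26_spec : Claim_equal_diana_henninger_day26 := by
  unfold Claim_equal_diana_henninger_day26
  intro chars n _ hpre
  unfold Spec_diana_henninger_day26
  by_cases hn : n ≤ 0
  · have h1 : PySem.List.pyRange 0 n 1 = [] := PySem.List.pyRange_one_eq_nil hn
    have h1b : PySem.List.pyRange 1 (n + 1) 1 = [] := PySem.List.pyRange_one_eq_nil (by omega)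
    have ht : PySem.Int.floordiv n 3 ≤ 0 := by
      rw [PySem.Int.floordiv_eq_ediv_of_pos (by norm_num)]; omega
    have h2 : PySem.List.pyRange 0 (PySem.Int.floordiv n 3) 1 = [] :=
      PySem.List.pyRange_one_eq_nil ht
    simp only [diana_henninger_day26, diana_henninger_day26_alt, h1, h1b, h2,
      if_neg (by omega : ¬ n > 0), List.foldl_nil, List.nil_append,
      PySem.List.pyRepeat_singleton, Int.toNat_of_nonpos ht, List.replicate_zero,
      PySem.List.slice_to_neg_one]
    simp [PySem.Chars.join_nil]
  · have hcs : chars.toList ≠ [] := by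
      intro h
      exact hn (hpre (String.toList_eq_nil_iff.mp h))
    have hnn : ((n.toNat : Nat) : Int) = n := Int.toNat_of_nonneg (by omega)
    set cs := chars.toList with hcsdef
    set m : Int := (cs.length : Int) with hm
    have hlen : 0 < cs.length := List.length_pos_iff.mpr hcs
    rw [show n = ((n.toNat : Nat) : Int) from hnn.symm]
    set nn := n.toNat with hnndef
    have hnnpos : 0 < nn := by omega
    simp only [diana_henninger_day26, diana_henninger_day26_alt]
    rw [pvOuter cs m ((nn : Nat) : Int) nn]
    rw [pvTrunkFold (PySem.List.pyRepeat [' '] ((nn : Int) - 1))]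
    -- B side: the stream, then the fold
    rw [if_pos (by exact_mod_cast hnnpos : ((nn : Nat) : Int) > 0)]
    have htot : PySem.Int.floordiv (((nn : Nat) : Int) * (((nn : Nat) : Int) + 1)) 2
        = ((pvTriN nn : Nat) : Int) := by rw [pvTri_eq, pvTri_natCast]
    rw [htot]
    have hdiv : PySem.Int.floordiv ((pvTriN nn : Nat) : Int) m + 1
        = (((pvTriN nn / cs.length + 1 : Nat) : Nat) : Int) := by
      rw [hm, PySem.Int.floordiv_natCast]; push_cast; ring
    rw [hdiv]
    set r : Nat := pvTriN nn / cs.length + 1 with hrdef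
    have hstream : PySem.List.pyRepeat cs ((r : Nat) : Int) = (List.replicate r cs).flatten := by
      simp [PySem.List.pyRepeat]
    rw [hstream]
    have hrange : PySem.List.pyRange 1 (((nn : Nat) : Int) + 1) 1
        = List.map (fun (j : Nat) => (1 : Int) + (j : Int)) (List.range nn) := by
      rw [PySem.List.pyRange_one]
      congr 1
      simp
    rw [hrange, pvBfold]
    have hcov : ∀ i ∈ List.range nn, pvTriN (i + 1) ≤ r * cs.length := by
      intro i hi
      rw [List.mem_range] at hi
      have h1 : pvTriN (i + 1) ≤ pvTriN nn := pvTriN_mono (by omega)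
      have h2 : pvTriN nn < r * cs.length := by
        rw [hrdef]
        have := Nat.div_add_mod (pvTriN nn) cs.length
        have := Nat.mod_lt (pvTriN nn) hlen
        nlinarith [Nat.div_add_mod (pvTriN nn) cs.length]
      omega
    have hB : (List.range nn).map (pvRowB ((nn : Nat) : Int) ((List.replicate r cs).flatten))
        = (List.range nn).map (pvRow cs m ((nn : Nat) : Int)) := by
      apply List.map_congr_left
      intro i hi
      rw [hm]
      exact pvRowB_eq_pvRow cs hcs _ r i (hcov i hi)
    rw [hB]
    rw [PySem.List.length_pyRange_one]
    simp only [sub_zero, PySem.List.pyRepeat_singleton, pvRowsCat]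
    congr 1
    rw [PySem.List.slice_to_neg_one]
    exact pvFinal _ _ _ (by
      simp only [ne_eq, List.map_eq_nil_iff, List.range_eq_nil]
      omega)
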